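-- pv_equiv track=rewrite | github.com/cnovel/AdventOfCode2020 | 17/day_17.py | get_neighs
-- ===== SOURCE A (Python) =====
-- def get_neighs(w_n, c_w, i_n, j_n, k_n, c):
--     n = []
--     for w in range(w_n-1, w_n+2):
--         if w < 0 or w >= c_w:
--             continue
--         for i in range(i_n-1, i_n+2):
--             if i < 0 or i >= c:
--                 continue
--             for j in range(j_n-1, j_n+2):
--                 if j < 0 or j >= c:
--                     continue
--                 for k in range(k_n-1, k_n+2):
--                     if k < 0 or k >= c:
--                         continue
--                     if w == w_n and i == i_n and j == j_n and k == k_n: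
--                         continue
--                     n.append((w, i, j, k))
--     return n
-- ===== SOURCE B (Python) =====
-- def get_neighs(w_n, c_w, i_n, j_n, k_n, c):
--     # Single flat loop over an 81-way index with base-3 digit decoding into
--     # per-axis offsets, instead of four nested loops; index 40 is the center.
--     n = []
--     for t in range(81):
--         if t == 40:
--             continue
--         dk = t % 3 - 1
--         dj = t // 3 % 3 - 1
--         di = t // 9 % 3 - 1
--         dw = t // 27 - 1
--         w, i, j, k = w_n + dw, i_n + di, j_n + dj, k_n + dk
--         if 0 <= w < c_w and 0 <= i < c and 0 <= j < c and 0 <= k < c: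
--             n.append((w, i, j, k))
--     return n
-- ===== Notes on version B (the rewrite author's own statement) =====
-- stated objective: alternative
-- what changed: Replaces the four nested guarded loops by ONE flat loop over a single index 0..80 that base-3-decodes the index into the four per-axis offsets (index 40 = the center, skipped), adds them to the center and keeps in-bounds tuples.
import Mathlib
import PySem

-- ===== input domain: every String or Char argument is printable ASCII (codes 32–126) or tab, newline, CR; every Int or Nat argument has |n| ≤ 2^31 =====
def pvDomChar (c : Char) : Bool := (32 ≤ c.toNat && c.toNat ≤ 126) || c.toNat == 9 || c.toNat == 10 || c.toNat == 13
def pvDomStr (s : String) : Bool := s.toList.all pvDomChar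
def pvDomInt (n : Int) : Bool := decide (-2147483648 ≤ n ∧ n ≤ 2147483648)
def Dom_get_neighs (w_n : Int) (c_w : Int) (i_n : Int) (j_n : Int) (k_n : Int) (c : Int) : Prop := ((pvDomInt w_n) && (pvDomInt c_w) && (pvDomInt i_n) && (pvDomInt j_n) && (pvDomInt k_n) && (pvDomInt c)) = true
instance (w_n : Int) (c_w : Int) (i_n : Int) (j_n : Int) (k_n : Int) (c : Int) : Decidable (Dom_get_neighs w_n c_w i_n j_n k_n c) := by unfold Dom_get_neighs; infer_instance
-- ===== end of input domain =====

-- B replaces the four nested guarded loops by one flat loop over an index 0..80,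
-- base-3-decoding the index into per-axis offsets (index 40 = the center, skipped):
-- an alternative decomposition of the same O(1) neighbor listing.


-- ===== PORT A =====
def get_neighs (w_n : Int) (c_w : Int) (i_n : Int) (j_n : Int) (k_n : Int) (c : Int) : List (Int × Int × Int × Int) :=
  (PySem.List.pyRange (w_n - 1) (w_n + 2) 1).foldl (fun n w =>
    if w < 0 ∨ c_w ≤ w then n else
    (PySem.List.pyRange (i_n - 1) (i_n + 2) 1).foldl (fun n i =>
      if i < 0 ∨ c ≤ i then n else
      (PySem.List.pyRange (j_n - 1) (j_n + 2) 1).foldl (fun n j =>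
        if j < 0 ∨ c ≤ j then n else
        (PySem.List.pyRange (k_n - 1) (k_n + 2) 1).foldl (fun n k =>
          if k < 0 ∨ c ≤ k then n else
          if w = w_n ∧ i = i_n ∧ j = j_n ∧ k = k_n then n else
          n ++ [(w, i, j, k)]) n) n) n) []

-- ===== PORT B =====
def get_neighs_alt (w_n : Int) (c_w : Int) (i_n : Int) (j_n : Int) (k_n : Int) (c : Int) : List (Int × Int × Int × Int) :=
  (PySem.List.pyRange 0 81 1).foldl (fun n t =>
    if t = 40 then n else
    let dk := PySem.Int.mod t 3 - 1
    let dj := PySem.Int.mod (PySem.Int.floordiv t 3) 3 - 1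
    let di := PySem.Int.mod (PySem.Int.floordiv t 9) 3 - 1
    let dw := PySem.Int.floordiv t 27 - 1
    let w := w_n + dw
    let i := i_n + di
    let j := j_n + dj
    let k := k_n + dk
    if 0 ≤ w ∧ w < c_w ∧ 0 ≤ i ∧ i < c ∧ 0 ≤ j ∧ j < c ∧ 0 ≤ k ∧ k < c then n ++ [(w, i, j, k)] else n) []

-- ===== PRECONDITION & SPEC =====
def Spec_get_neighs (w_n : Int) (c_w : Int) (i_n : Int) (j_n : Int) (k_n : Int) (c : Int) (out : List (Int × Int × Int × Int)) : Prop := out = get_neighs_alt w_n c_w i_n j_n k_n c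
instance (w_n : Int) (c_w : Int) (i_n : Int) (j_n : Int) (k_n : Int) (c : Int) (out : List (Int × Int × Int × Int)) : Decidable (Spec_get_neighs w_n c_w i_n j_n k_n c out) := by unfold Spec_get_neighs; infer_instance

-- ===== CLAIM (what is proved, stated in full; the proofs are below) =====
def Claim_equal_get_neighs : Prop := ∀ (w_n : Int) (c_w : Int) (i_n : Int) (j_n : Int) (k_n : Int) (c : Int), Dom_get_neighs w_n c_w i_n j_n k_n c → Spec_get_neighs w_n c_w i_n j_n k_n c (get_neighs w_n c_w i_n j_n k_n c)

-- ===== LEMMAS AND PROOFS =====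

/-- The common leaf: keep the cell iff it is in bounds on every axis. -/
def pvLeaf (c_w c w i j k : Int) : List (Int × Int × Int × Int) :=
  if 0 ≤ w ∧ w < c_w ∧ 0 ≤ i ∧ i < c ∧ 0 ≤ j ∧ j < c ∧ 0 ≤ k ∧ k < c then [(w, i, j, k)] else []

/-- The 80 non-center offsets, in B's (= base-3, k fastest = A's lexicographic) order. -/
def pvDeltas : List (Int × Int × Int × Int) := [
  (-1, -1, -1, -1),
  (-1, -1, -1, 0),
  (-1, -1, -1, 1),
  (-1, -1, 0, -1),
  (-1, -1, 0, 0),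
  (-1, -1, 0, 1),
  (-1, -1, 1, -1),
  (-1, -1, 1, 0),
  (-1, -1, 1, 1),
  (-1, 0, -1, -1),
  (-1, 0, -1, 0),
  (-1, 0, -1, 1),
  (-1, 0, 0, -1),
  (-1, 0, 0, 0),
  (-1, 0, 0, 1),
  (-1, 0, 1, -1),
  (-1, 0, 1, 0),
  (-1, 0, 1, 1),
  (-1, 1, -1, -1),
  (-1, 1, -1, 0),
  (-1, 1, -1, 1),
  (-1, 1, 0, -1),
  (-1, 1, 0, 0),
  (-1, 1, 0, 1),
  (-1, 1, 1, -1),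
  (-1, 1, 1, 0),
  (-1, 1, 1, 1),
  (0, -1, -1, -1),
  (0, -1, -1, 0),
  (0, -1, -1, 1),
  (0, -1, 0, -1),
  (0, -1, 0, 0),
  (0, -1, 0, 1),
  (0, -1, 1, -1),
  (0, -1, 1, 0),
  (0, -1, 1, 1),
  (0, 0, -1, -1),
  (0, 0, -1, 0),
  (0, 0, -1, 1),
  (0, 0, 0, -1),
  (0, 0, 0, 1),
  (0, 0, 1, -1),
  (0, 0, 1, 0),
  (0, 0, 1, 1),
  (0, 1, -1, -1),
  (0, 1, -1, 0),
  (0, 1, -1, 1),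
  (0, 1, 0, -1),
  (0, 1, 0, 0),
  (0, 1, 0, 1),
  (0, 1, 1, -1),
  (0, 1, 1, 0),
  (0, 1, 1, 1),
  (1, -1, -1, -1),
  (1, -1, -1, 0),
  (1, -1, -1, 1),
  (1, -1, 0, -1),
  (1, -1, 0, 0),
  (1, -1, 0, 1),
  (1, -1, 1, -1),
  (1, -1, 1, 0),
  (1, -1, 1, 1),
  (1, 0, -1, -1),
  (1, 0, -1, 0),
  (1, 0, -1, 1),
  (1, 0, 0, -1),
  (1, 0, 0, 0),
  (1, 0, 0, 1),
  (1, 0, 1, -1),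
  (1, 0, 1, 0),
  (1, 0, 1, 1),
  (1, 1, -1, -1),
  (1, 1, -1, 0),
  (1, 1, -1, 1),
  (1, 1, 0, -1),
  (1, 1, 0, 0),
  (1, 1, 0, 1),
  (1, 1, 1, -1),
  (1, 1, 1, 0),
  (1, 1, 1, 1)
]

/-- B's per-index offset decoding. -/
def pvDelta (t : Int) : Int × Int × Int × Int :=
  (PySem.Int.floordiv t 27 - 1, PySem.Int.mod (PySem.Int.floordiv t 9) 3 - 1,
   PySem.Int.mod (PySem.Int.floordiv t 3) 3 - 1, PySem.Int.mod t 3 - 1)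

/-- A's loop shape at every level: skip on the guard, otherwise append a block. -/
lemma pv_guard_loop {β : Type} (p : Int → Prop) [DecidablePred p] (F : Int → List β)
    (step : List β → Int → List β) (h : ∀ a x, step a x = if p x then a else a ++ F x) :
    ∀ (xs : List Int) (acc : List β),
      List.foldl step acc xs = acc ++ (xs.filter (fun x => ¬ p x)).flatMap F := by
  intro xs
  induction xs with
  | nil => intro acc; simp
  | cons x xs ih =>
    intro acc
    by_cases hp : p x <;>
      simp [List.foldl_cons, h, hp, ih, List.append_assoc]

/-- A conditional skip before an append is an append of a conditional block. -/
lemma pv_ite_skip {β : Type} (p : Prop) [Decidable p] (a : List β) (y : β) :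
    (if p then a else a ++ [y]) = a ++ (if p then [] else [y]) := by
  by_cases hp : p <;> simp [hp]

/-- A conditional append is an append of a conditional block. -/
lemma pv_ite_append {β : Type} (p : Prop) [Decidable p] (a : List β) (y : β) :
    (if p then a ++ [y] else a) = a ++ (if p then [y] else []) := by
  by_cases hp : p <;> simp [hp]

/-- Filtering before flatMap = guarding inside flatMap. -/
lemma pv_filter_flatMap {β : Type} (p : Int → Prop) [DecidablePred p] (F : Int → List β)
    (l : List Int) :
    (l.filter (fun x => ¬ p x)).flatMap F = l.flatMap (fun x => if p x then [] else F x) := by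
  induction l with
  | nil => rfl
  | cons x xs ih =>
    simp only [decide_not] at ih ⊢
    by_cases hp : p x <;> simp [hp, ih]

/-- Push an axis guard inside the flatMap over the inner axes. -/
lemma pv_push {α β : Type} (p : Prop) [Decidable p] (l : List α) (F : α → List β) :
    (if p then [] else l.flatMap F) = l.flatMap (fun x => if p then [] else F x) := by
  by_cases hp : p <;> simp [hp]

/-- A's guard chain at a non-center cell is the common leaf. -/
lemma pv_chain (c_w c w i j k : Int) :
    (if w < 0 ∨ c_w ≤ w then ([] : List (Int × Int × Int × Int)) else
     if i < 0 ∨ c ≤ i then [] else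
     if j < 0 ∨ c ≤ j then [] else
     if k < 0 ∨ c ≤ k then [] else [(w, i, j, k)]) = pvLeaf c_w c w i j k := by
  unfold pvLeaf
  split_ifs <;> first | rfl | omega

lemma pv_range3 (a : Int) : PySem.List.pyRange (a - 1) (a + 2) 1 = [a - 1, a, a + 1] := by
  rw [PySem.List.pyRange_one_cons (by omega), PySem.List.pyRange_one_cons (by omega),
    PySem.List.pyRange_one_cons (by omega), PySem.List.pyRange_one_eq_nil (by omega)]
  norm_num

lemma pv_addneg (a : Int) : a + -1 = a - 1 := by ring

/-- B's filtered index list decodes to exactly the 80 offsets. -/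
lemma pv_map_deltas :
    ((PySem.List.pyRange 0 81 1).filter (fun t => ¬ t = 40)).map pvDelta = pvDeltas := by
  decide

/-- B equals the common normal form. -/
lemma pv_B_eq (w_n c_w i_n j_n k_n c : Int) :
    get_neighs_alt w_n c_w i_n j_n k_n c =
      pvDeltas.flatMap (fun d => pvLeaf c_w c (w_n + d.1) (i_n + d.2.1) (j_n + d.2.2.1) (k_n + d.2.2.2)) := by
  unfold get_neighs_alt
  rw [pv_guard_loop (fun t => t = 40) _ _ (fun a t => by
    dsimp only
    rw [pv_ite_append])]
  rw [show (fun t => if 0 ≤ w_n + (PySem.Int.floordiv t 27 - 1) ∧ w_n + (PySem.Int.floordiv t 27 - 1) < c_w ∧ 0 ≤ i_n + (PySem.Int.mod (PySem.Int.floordiv t 9) 3 - 1) ∧ i_n + (PySem.Int.mod (PySem.Int.floordiv t 9) 3 - 1) < c ∧ 0 ≤ j_n + (PySem.Int.mod (PySem.Int.floordiv t 3) 3 - 1) ∧ j_n + (PySem.Int.mod (PySem.Int.floordiv t 3) 3 - 1) < c ∧ 0 ≤ k_n + (PySem.Int.mod t 3 - 1) ∧ k_n + (PySem.Int.mod t 3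 - 1) < c then [(w_n + (PySem.Int.floordiv t 27 - 1), i_n + (PySem.Int.mod (PySem.Int.floordiv t 9) 3 - 1), j_n + (PySem.Int.mod (PySem.Int.floordiv t 3) 3 - 1), k_n + (PySem.Int.mod t 3 - 1))] else [])
      = fun t => (fun d => pvLeaf c_w c (w_n + d.1) (i_n + d.2.1) (j_n + d.2.2.1) (k_n + d.2.2.2)) (pvDelta t) from rfl]
  rw [← pv_map_deltas, List.flatMap_map]
  simp

/-- A equals the common normal form. -/
lemma pv_A_eq (w_n c_w i_n j_n k_n c : Int) :
    get_neighs w_n c_w i_n j_n k_n c =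
      pvDeltas.flatMap (fun d => pvLeaf c_w c (w_n + d.1) (i_n + d.2.1) (j_n + d.2.2.1) (k_n + d.2.2.2)) := by
  unfold get_neighs
  rw [pv_guard_loop (fun w => w < 0 ∨ c_w ≤ w) _ _ (fun a w => by
    rw [pv_guard_loop (fun i => i < 0 ∨ c ≤ i) _ _ (fun a i => by
      rw [pv_guard_loop (fun j => j < 0 ∨ c ≤ j) _ _ (fun a j => by
        rw [pv_guard_loop (fun k => k < 0 ∨ c ≤ k) _ _ (fun a k => by
          rw [pv_ite_skip])])])])]
  simp only [List.nil_append, pv_filter_flatMap]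
  simp only [pv_push]
  simp only [pv_range3, List.flatMap_cons, List.flatMap_nil, List.append_nil]
  simp only [sub_eq_self, add_eq_left, one_ne_zero, and_true, and_false,
    if_true, if_false, ite_self, pv_chain]
  simp only [pvDeltas, List.flatMap_cons, List.flatMap_nil, List.append_nil, pv_addneg, add_zero]
  simp only [List.append_assoc, List.nil_append]

-- ===== VERDICT (by name: the statement is the Claim_ definition above) =====
theorem get_neighs_spec : Claim_equal_get_neighs := by
  intro w_n c_w i_n j_n k_n c _hd
  unfold Spec_get_neighs
  rw [pv_A_eq, pv_B_eq]
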